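-- pv_equiv track=rewrite | github.com/kaifsadri/Advent-of-Code-2024 | 07.py | poss1
-- ===== SOURCE A (Python) =====
-- def poss1(target, eq: list) -> bool:
--     n = eq[-1]
--     if len(eq) == 1:
--         return target == eq[0]
--     if target % n == 0:
--         if poss1(target // n, eq[:-1]):
--             return True
--     if target >= n:
--         if poss1(target - n, eq[:-1]):
--             return True
--     return False
-- ===== SOURCE B (Python) =====
-- def poss1(target, eq: list) -> bool:
--     candidates = {target}
--     for n in reversed(eq[1:]):
--         candidates = {t // n for t in candidates if t % n == 0} | \
--                      {t - n for t in candidates if t >= n}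
--     return eq[0] in candidates
-- ===== Notes on version B (the rewrite author's own statement) =====
-- stated objective: alternative
-- what changed: Replaces A's backward recursive depth-first search (boolean recursion peeling the last element) by an iterative breadth-first pass that folds over the reversed tail maintaining the deduplicated set of candidate targets and finally tests membership of the head.
-- outside the precondition, e.g. on poss1(3, [1, 0, 5]): A returns False, B returns False
import Mathlib
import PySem

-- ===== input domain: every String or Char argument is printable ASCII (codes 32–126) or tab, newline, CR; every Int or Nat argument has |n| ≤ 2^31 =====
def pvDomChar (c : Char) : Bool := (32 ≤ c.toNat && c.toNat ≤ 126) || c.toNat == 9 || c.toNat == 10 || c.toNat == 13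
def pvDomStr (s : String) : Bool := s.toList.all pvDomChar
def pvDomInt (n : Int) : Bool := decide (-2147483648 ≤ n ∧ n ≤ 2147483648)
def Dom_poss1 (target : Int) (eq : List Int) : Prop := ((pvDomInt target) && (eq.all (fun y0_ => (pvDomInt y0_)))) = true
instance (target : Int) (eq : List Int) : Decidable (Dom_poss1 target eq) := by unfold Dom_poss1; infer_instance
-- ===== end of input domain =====

-- B replaces A's backward recursive depth-first search by an iterative breadth-first pass:
-- it folds over the reversed tail maintaining the deduplicated SET of candidate targets
-- (an 'alternative' decomposition, not claimed faster).

-- ===== PORT A =====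
def poss1 (target : Int) (eq : List Int) : Bool :=
  match eq with
  | [] => false          -- Python: eq[-1] raises IndexError (excluded by Pre_)
  | [x] => decide (target = x)
  | x :: y :: rest =>
      let n := (x :: y :: rest).getLastD 0          -- eq[-1]
      let prev := (x :: y :: rest).dropLast         -- eq[:-1]
      ((decide (PySem.Int.mod target n = 0) && poss1 (PySem.Int.floordiv target n) prev) ||
       (decide (target ≥ n) && poss1 (target - n) prev))
termination_by eq.length
decreasing_by all_goals (simp only [List.length_dropLast, List.length_cons]; omega)

-- ===== PORT B =====
-- one loop step: candidates = {t // n for t in candidates if t % n == 0} | {t - n for t in candidates if t >= n}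
def pvStep (cand : PySem.Set Int) (n : Int) : PySem.Set Int :=
  PySem.Set.union
    (PySem.Set.ofList ((cand.filter (fun t => PySem.Int.mod t n == 0)).map
      (fun t => PySem.Int.floordiv t n)))
    (PySem.Set.ofList ((cand.filter (fun t => decide (t ≥ n))).map (fun t => t - n)))

def poss1_alt (target : Int) (eq : List Int) : Bool :=
  match eq with
  | [] => false          -- Python: eq[0] raises IndexError (excluded by Pre_)
  | x :: rest =>
      PySem.Set.contains (rest.reverse.foldl pvStep (PySem.Set.ofList [target])) x

-- ===== PRECONDITION & SPEC =====
-- Pre_ excludes the empty list (eq[-1] / eq[0] raise IndexError in both programs) and lists with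
-- a 0 after the head, on which both programs may hit a division by zero (ZeroDivisionError).
def Pre_poss1 (target : Int) (eq : List Int) : Prop :=
  eq ≠ [] ∧ ∀ v ∈ eq.drop 1, v ≠ 0
instance (target : Int) (eq : List Int) : Decidable (Pre_poss1 target eq) := by
  unfold Pre_poss1; infer_instance
def pvWitness_poss1 : Int × List Int := (292, [11, 6, 16, 20])

def Spec_poss1 (target : Int) (eq : List Int) (out : Bool) : Prop := out = poss1_alt target eq
instance (target : Int) (eq : List Int) (out : Bool) : Decidable (Spec_poss1 target eq out) := by
  unfold Spec_poss1; infer_instance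

-- ===== CLAIM (what is proved, stated in full; the proofs are below) =====
def Claim_equal_poss1 : Prop := ∀ (target : Int) (eq : List Int), Dom_poss1 target eq → Pre_poss1 target eq → Spec_poss1 target eq (poss1 target eq)

-- ===== LEMMAS AND PROOFS =====

lemma mem_pvStep (T : PySem.Set Int) (n v : Int) :
    v ∈ pvStep T n ↔
      (∃ t ∈ T, PySem.Int.mod t n = 0 ∧ PySem.Int.floordiv t n = v) ∨
      (∃ t ∈ T, n ≤ t ∧ t - n = v) := by
  simp [pvStep, PySem.Set.mem_union, PySem.Set.mem_ofList, List.mem_map, List.mem_filter,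
    and_assoc]

lemma mem_pvStep_singleton (t n v : Int) :
    v ∈ pvStep (PySem.Set.ofList [t]) n ↔
      (PySem.Int.mod t n = 0 ∧ PySem.Int.floordiv t n = v) ∨ (n ≤ t ∧ t - n = v) := by
  rw [mem_pvStep]
  simp [PySem.Set.mem_ofList]

-- the frontier step acts elementwise, so folding from a set is folding from its singletons
lemma mem_foldl_pvStep : ∀ (l : List Int) (T : PySem.Set Int) (x : Int),
    x ∈ l.foldl pvStep T ↔ ∃ t ∈ T, x ∈ l.foldl pvStep (PySem.Set.ofList [t]) := by
  intro l
  induction l with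
  | nil =>
      intro T x
      simp [PySem.Set.mem_ofList]
  | cons n l ih =>
      intro T x
      simp only [List.foldl_cons]
      rw [ih (pvStep T n) x]
      constructor
      · rintro ⟨s, hs, hx⟩
        rcases (mem_pvStep T n s).1 hs with ⟨t, ht, hc⟩ | ⟨t, ht, hc⟩
        · refine ⟨t, ht, ?_⟩
          rw [ih (pvStep (PySem.Set.ofList [t]) n) x]
          exact ⟨s, (mem_pvStep _ n s).2 (Or.inl ⟨t, by simp [PySem.Set.mem_ofList], hc⟩), hx⟩
        · refine ⟨t, ht, ?_⟩
          rw [ih (pvStep (PySem.Set.ofList [t]) n) x]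
          exact ⟨s, (mem_pvStep _ n s).2 (Or.inr ⟨t, by simp [PySem.Set.mem_ofList], hc⟩), hx⟩
      · rintro ⟨t, ht, hx⟩
        rw [ih (pvStep (PySem.Set.ofList [t]) n) x] at hx
        obtain ⟨s, hs, hx⟩ := hx
        refine ⟨s, ?_, hx⟩
        rcases (mem_pvStep _ n s).1 hs with ⟨t', ht', hc⟩ | ⟨t', ht', hc⟩ <;>
          rw [PySem.Set.mem_ofList] at ht' <;> simp at ht' <;> subst ht'
        · exact (mem_pvStep T n s).2 (Or.inl ⟨t', ht, hc⟩)
        · exact (mem_pvStep T n s).2 (Or.inr ⟨t', ht, hc⟩)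

-- unfolding A at a list with its last element exposed
lemma poss1_concat (t x n : Int) (ys : List Int) :
    poss1 t (x :: (ys ++ [n])) =
      ((decide (PySem.Int.mod t n = 0) && poss1 (PySem.Int.floordiv t n) (x :: ys)) ||
       (decide (t ≥ n) && poss1 (t - n) (x :: ys))) := by
  cases ys with
  | nil => rw [poss1.eq_def]; simp [poss1.eq_def]
  | cons z ys' =>
      show poss1 t (x :: z :: (ys' ++ [n])) = _
      rw [poss1.eq_def]
      have h1 : (x :: z :: (ys' ++ [n])).getLastD 0 = n := by
        show ((x :: z :: ys') ++ [n]).getLastD 0 = n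
        exact List.getLastD_concat
      have h2 : (x :: z :: (ys' ++ [n])).dropLast = x :: z :: ys' := by
        show ((x :: z :: ys') ++ [n]).dropLast = x :: z :: ys'
        exact List.dropLast_concat
      simp only [h1, h2]

-- A's backward search answers membership of the head in B's backward frontier set
lemma poss1_eq_back : ∀ (rest : List Int) (x t : Int),
    poss1 t (x :: rest) =
      decide (x ∈ rest.reverse.foldl pvStep (PySem.Set.ofList [t])) := by
  intro rest
  induction rest using List.reverseRecOn with
  | nil =>
      intro x t
      rw [poss1.eq_def]
      simp [PySem.Set.mem_ofList, eq_comm]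
  | append_singleton ys n ih =>
      intro x t
      rw [poss1_concat]
      rw [List.reverse_append]
      simp only [List.reverse_cons, List.reverse_nil, List.nil_append, List.singleton_append,
        List.foldl_cons]
      rw [Bool.eq_iff_iff]
      simp only [Bool.or_eq_true, Bool.and_eq_true, decide_eq_true_eq]
      rw [mem_foldl_pvStep]
      constructor
      · rintro (⟨hmod, hrec⟩ | ⟨hge, hrec⟩)
        · rw [ih x (PySem.Int.floordiv t n), decide_eq_true_eq] at hrec
          exact ⟨PySem.Int.floordiv t n,
            (mem_pvStep _ n _).2 (Or.inl ⟨t, by simp [PySem.Set.mem_ofList], hmod, rfl⟩), hrec⟩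
        · rw [ih x (t - n), decide_eq_true_eq] at hrec
          exact ⟨t - n,
            (mem_pvStep _ n _).2 (Or.inr ⟨t, by simp [PySem.Set.mem_ofList], hge, rfl⟩), hrec⟩
      · rintro ⟨s, hs, hx⟩
        rcases (mem_pvStep_singleton t n s).1 hs with ⟨hmod, hfd⟩ | ⟨hge, hsub⟩
        · left
          refine ⟨hmod, ?_⟩
          rw [ih x (PySem.Int.floordiv t n), decide_eq_true_eq, hfd]
          exact hx
        · right
          refine ⟨hge, ?_⟩
          rw [ih x (t - n), decide_eq_true_eq, hsub]
          exact hx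

-- ===== VERDICT (by name: the statement is the Claim_ definition above) =====
theorem poss1_spec : Claim_equal_poss1 := by
  intro target eq _ hpre
  unfold Spec_poss1
  cases eq with
  | nil => exact absurd rfl hpre.1
  | cons x rest =>
      rw [poss1_eq_back rest x target, poss1_alt]
      rw [Bool.eq_iff_iff, decide_eq_true_eq, PySem.Set.contains_iff]
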